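-- pv_equiv track=rewrite | github.com/segue90/OoT-Randomizer | Hints.py | get_raw_text
-- ===== SOURCE A (Python) =====
-- def get_raw_text(string: str) -> str:
--     text = ''
--     for char in string:
--         if char == '^':
--             text += '\x04' # box break
--         elif char == '&':
--             text += '\x01' # new line
--         elif char == '@':
--             text += '\x0F' # print player name
--         elif char == '#':
--             text += '\x05\x40' # sets color to white
--         else:
--             text += char
--     return text
-- ===== SOURCE B (Python) =====
-- def get_raw_text(string: str) -> str:
--     return (string.replace('^', '\x04')
--                   .replace('&', '\x01')
--                   .replace('@', '\x0F')
--                   .replace('#', '\x05\x40'))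
-- ===== Notes on version B (the rewrite author's own statement) =====
-- stated objective: idiomatic
-- what changed: Replaces A's single character-by-character branching loop with an accumulator by four independent full-string str.replace passes (one per control character); the replacement strings contain none of the four triggers, so the passes cannot interfere.
import Mathlib
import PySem

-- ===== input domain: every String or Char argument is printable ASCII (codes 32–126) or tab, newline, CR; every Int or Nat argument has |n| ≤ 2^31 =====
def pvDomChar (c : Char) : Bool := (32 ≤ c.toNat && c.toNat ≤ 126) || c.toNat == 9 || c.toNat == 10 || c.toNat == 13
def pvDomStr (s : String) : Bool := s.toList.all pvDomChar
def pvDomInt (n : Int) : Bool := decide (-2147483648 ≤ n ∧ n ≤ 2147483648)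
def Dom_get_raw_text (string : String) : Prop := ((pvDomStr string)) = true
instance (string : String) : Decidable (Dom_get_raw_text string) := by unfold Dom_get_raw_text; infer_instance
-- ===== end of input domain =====

-- B replaces A's single branching per-character loop with four independent str.replace passes (idiomatic).

-- ===== PORT A =====
-- A: one pass over the characters, appending a translation of each to an accumulator.
def get_raw_text (string : String) : String :=
  String.ofList <| string.toList.foldl (fun text char =>
    if char = '^' then text ++ ['\x04']
    else if char = '&' then text ++ ['\x01']
    else if char = '@' then text ++ ['\x0F']
    else if char = '#' then text ++ ['\x05', '\x40']
    else text ++ [char]) []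

-- ===== PORT B =====
-- B: four chained full-string replace passes.
def get_raw_text_alt (string : String) : String :=
  PySem.Str.replace
    (PySem.Str.replace
      (PySem.Str.replace
        (PySem.Str.replace string "^" "\x04")
        "&" "\x01")
      "@" "\x0F")
    "#" "\x05\x40"

-- ===== PRECONDITION & SPEC =====
def Spec_get_raw_text (string : String) (out : String) : Prop := out = get_raw_text_alt string
instance (string : String) (out : String) : Decidable (Spec_get_raw_text string out) := by unfold Spec_get_raw_text; infer_instance

-- ===== CLAIM (what is proved, stated in full; the proofs are below) =====
def Claim_equal_get_raw_text : Prop := ∀ (string : String), Dom_get_raw_text string → Spec_get_raw_text string (get_raw_text string)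

-- ===== LEMMAS AND PROOFS =====

-- single-character replace is a flatMap
theorem go_single (c : Char) (r : List Char) :
    ∀ (l acc : List Char) (fuel : Nat), l.length ≤ fuel →
      PySem.Chars.replace.go [c] r fuel l acc
        = acc.reverse ++ l.flatMap (fun x => if x = c then r else [x]) := by
  intro l
  induction l with
  | nil =>
    intro acc fuel _
    cases fuel <;> simp [PySem.Chars.replace.go]
  | cons h t ih =>
    intro acc fuel hf
    cases fuel with
    | zero => simp at hf
    | succ n =>
      by_cases hc : h = c
      · subst hc
        have hp : List.isPrefixOf [h] (h :: t) = true := by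
          simp [List.isPrefixOf]
        simp only [PySem.Chars.replace.go, hp, if_true]
        rw [show List.drop [h].length (h :: t) = t from rfl,
            ih (r.reverse ++ acc) n (by simpa using Nat.le_of_succ_le_succ hf)]
        simp
      · have hp : List.isPrefixOf [c] (h :: t) = false := by
          simp [List.isPrefixOf]
          exact fun h' => absurd h'.symm hc
        simp only [PySem.Chars.replace.go, hp]
        rw [if_neg (by simp)]
        rw [ih (h :: acc) n (by simpa using Nat.le_of_succ_le_succ hf)]
        simp [hc]

theorem replace_single (s : List Char) (c : Char) (r : List Char) :
    PySem.Chars.replace s [c] r = s.flatMap (fun x => if x = c then r else [x]) := by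
  rw [PySem.Chars.replace]
  rw [if_neg (by simp)]
  rw [go_single c r s [] s.length (le_refl _)]
  simp

-- translation of one character, combined
def pvTr (c : Char) : List Char :=
  if c = '^' then ['\x04']
  else if c = '&' then ['\x01']
  else if c = '@' then ['\x0F']
  else if c = '#' then ['\x05', '\x40']
  else [c]

theorem foldA_eq (l acc : List Char) :
    l.foldl (fun text char =>
      if char = '^' then text ++ ['\x04']
      else if char = '&' then text ++ ['\x01']
      else if char = '@' then text ++ ['\x0F']
      else if char = '#' then text ++ ['\x05', '\x40']
      else text ++ [char]) acc = acc ++ l.flatMap pvTr := by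
  induction l generalizing acc with
  | nil => simp
  | cons h t ih =>
    simp only [List.foldl_cons, List.flatMap_cons, ih, pvTr]
    split_ifs <;> simp

theorem chain_eq (l : List Char) :
    ((((l.flatMap (fun x => if x = '^' then ['\x04'] else [x])).flatMap
        (fun x => if x = '&' then ['\x01'] else [x])).flatMap
        (fun x => if x = '@' then ['\x0F'] else [x])).flatMap
        (fun x => if x = '#' then ['\x05', '\x40'] else [x]))
      = l.flatMap pvTr := by
  induction l with
  | nil => simp
  | cons h t ih =>
    simp only [List.flatMap_cons, List.flatMap_append, ih, pvTr]
    congr 1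
    by_cases h1 : h = '^'
    · subst h1; decide
    · by_cases h2 : h = '&'
      · subst h2; decide
      · by_cases h3 : h = '@'
        · subst h3; decide
        · by_cases h4 : h = '#'
          · subst h4; decide
          · simp [h1, h2, h3, h4]

-- ===== VERDICT (by name: the statement is the Claim_ definition above) =====
theorem get_raw_text_spec : Claim_equal_get_raw_text := by
  intro s _
  unfold Spec_get_raw_text get_raw_text get_raw_text_alt
  simp only [PySem.Str.replace, String.toList_ofList]
  rw [foldA_eq]
  congr 1
  rw [show ("^" : String).toList = ['^'] from rfl,
      show ("&" : String).toList = ['&'] from rfl,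
      show ("@" : String).toList = ['@'] from rfl,
      show ("#" : String).toList = ['#'] from rfl,
      replace_single, replace_single, replace_single, replace_single]
  simpa using (chain_eq s.toList).symm
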